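-- pv_equiv track=rewrite | github.com/servo/servo | python/wpt/grouping_formatter.py | wrap_and_indent_lines
-- ===== SOURCE A (Python) =====
-- def wrap_and_indent_lines(lines, indent: str):
--     if not lines:
--         return ""
--
--     output = indent + "\u25b6 %s\n" % lines[0]
--     for line in lines[1:-1]:
--         output += indent + "\u2502 %s\n" % line
--     if len(lines) > 1:
--         output += indent + "\u2514 %s\n" % lines[-1]
--     return output
-- ===== SOURCE B (Python) =====
-- def wrap_and_indent_lines(lines, indent: str):
--     n = len(lines)
--     if n == 0:
--         return ""
--     prefixes = "\u25b6" if n == 1 else "\u25b6" + "\u2502" * (n - 2) + "\u2514"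
--     return "".join("%s%s %s\n" % (indent, p, line) for p, line in zip(prefixes, lines))
-- ===== Notes on version B (the rewrite author's own statement) =====
-- stated objective: alternative
-- what changed: Instead of A's three-segment emission (first line, loop over lines[1:-1], conditional last line), B first computes the whole prefix column as a closed-form string "▶" + "│"*(n-2) + "└" and then zips it with the lines, joining uniformly formatted rows.
import Mathlib
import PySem

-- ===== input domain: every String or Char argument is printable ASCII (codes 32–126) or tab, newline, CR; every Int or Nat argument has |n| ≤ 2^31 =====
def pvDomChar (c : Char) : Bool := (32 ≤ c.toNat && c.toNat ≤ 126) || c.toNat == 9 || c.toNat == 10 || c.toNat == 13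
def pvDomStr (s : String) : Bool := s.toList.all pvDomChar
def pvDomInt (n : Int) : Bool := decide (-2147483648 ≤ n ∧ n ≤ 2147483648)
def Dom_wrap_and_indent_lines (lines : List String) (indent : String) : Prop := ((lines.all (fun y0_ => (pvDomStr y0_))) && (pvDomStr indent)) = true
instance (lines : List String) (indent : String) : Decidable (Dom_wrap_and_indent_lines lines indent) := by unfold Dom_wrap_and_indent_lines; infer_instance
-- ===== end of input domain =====

-- B replaces A's three-segment build (head, loop over lines[1:-1], conditional tail) with a
-- precomputed prefix table "▶"+"│"*(n-2)+"└" zipped against the lines; objective: alternative.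


-- ===== PORT A =====
def wrap_and_indent_lines (lines : List String) (indent : String) : String :=
  match lines with
  | [] => ""
  | x :: rest =>
    let output := indent ++ "▶ " ++ x ++ "\n"
    let output := (PySem.List.slice (x :: rest) (some 1) (some (-1))).foldl
        (fun o line => o ++ indent ++ "│ " ++ line ++ "\n") output
    if (x :: rest).length > 1 then
      output ++ indent ++ "└ " ++ (x :: rest).getLast (by simp) ++ "\n"
    else output

-- ===== PORT B =====
def wrap_and_indent_lines_alt (lines : List String) (indent : String) : String :=
  let n := lines.length
  if n = 0 then ""
  else
    let prefixes : List Char :=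
      if n = 1 then ['▶'] else '▶' :: (List.replicate (n - 2) '│' ++ ['└'])
    String.join ((prefixes.zip lines).map
      (fun p => indent ++ String.mk [p.1] ++ " " ++ p.2 ++ "\n"))

-- ===== PRECONDITION & SPEC =====
def Spec_wrap_and_indent_lines (lines : List String) (indent : String) (out : String) : Prop := out = wrap_and_indent_lines_alt lines indent
instance (lines : List String) (indent : String) (out : String) : Decidable (Spec_wrap_and_indent_lines lines indent out) := by unfold Spec_wrap_and_indent_lines; infer_instance

-- ===== CLAIM =====
def Claim_equal_wrap_and_indent_lines : Prop := ∀ (lines : List String) (indent : String), Dom_wrap_and_indent_lines lines indent → Spec_wrap_and_indent_lines lines indent (wrap_and_indent_lines lines indent)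

-- ===== LEMMAS AND PROOFS =====

@[simp] lemma mk_arrow : String.mk ['▶'] ++ " " = "▶ " := by decide
@[simp] lemma mk_end : String.mk ['└'] ++ " " = "└ " := by decide
@[simp] lemma mk_mid : String.mk ['│'] ++ " " = "│ " := by decide
@[simp] lemma mk_arrow' (t : String) : String.mk ['▶'] ++ (" " ++ t) = "▶ " ++ t := by
  rw [← String.append_assoc, mk_arrow]
@[simp] lemma mk_end' (t : String) : String.mk ['└'] ++ (" " ++ t) = "└ " ++ t := by
  rw [← String.append_assoc, mk_end]
@[simp] lemma mk_mid' (t : String) : String.mk ['│'] ++ (" " ++ t) = "│ " ++ t := by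
  rw [← String.append_assoc, mk_mid]

@[simp] lemma join_nil : String.join ([] : List String) = "" := rfl
lemma foldl_append_str (l : List String) (a : String) :
    l.foldl (· ++ ·) a = a ++ l.foldl (· ++ ·) "" := by
  induction l generalizing a with
  | nil => simp
  | cons b t ih =>
    rw [List.foldl_cons, List.foldl_cons, ih (a ++ b), ih ("" ++ b)]
    simp [String.append_assoc]
@[simp] lemma join_cons (a : String) (l : List String) :
    String.join (a :: l) = a ++ String.join l := by
  rw [String.join, String.join, List.foldl_cons, foldl_append_str]
  simp

-- xs[1:-1] is the tail minus the last element
lemma slice_one_neg_one (x : String) (rest : List String) :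
    PySem.List.slice (x :: rest) (some 1) (some (-1)) = rest.dropLast := by
  simp [PySem.List.slice, PySem.List.clampIdx, List.dropLast_eq_take]
  split <;> omega

-- A's middle-loop-plus-last-line tail equals B's zip of the │…└ prefix tail with rest
lemma tail_eq (indent : String) (rest : List String) (h : rest ≠ []) (s : String) :
    (rest.dropLast.foldl (fun o line => o ++ indent ++ "│ " ++ line ++ "\n") s)
      ++ indent ++ "└ " ++ rest.getLast h ++ "\n"
    = s ++ String.join (((List.replicate (rest.length - 1) '│' ++ ['└']).zip rest).map
        (fun p => indent ++ String.mk [p.1] ++ " " ++ p.2 ++ "\n")) := by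
  induction rest generalizing s with
  | nil => exact absurd rfl h
  | cons y t ih =>
    cases t with
    | nil => simp [String.append_assoc]
    | cons z u =>
      have h2 : z :: u ≠ [] := by simp
      have key := ih h2 (s ++ indent ++ "│ " ++ y ++ "\n")
      have e1 : (y :: z :: u).dropLast = y :: (z :: u).dropLast := by simp
      rw [e1, List.foldl_cons, List.getLast_cons h2, key]
      simp [List.replicate_succ, String.append_assoc]

-- ===== VERDICT =====
theorem wrap_and_indent_lines_spec : Claim_equal_wrap_and_indent_lines := by
  intro lines indent _
  unfold Spec_wrap_and_indent_lines wrap_and_indent_lines wrap_and_indent_lines_alt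
  cases lines with
  | nil => simp
  | cons x rest =>
    cases rest with
    | nil => simp [slice_one_neg_one, String.append_assoc]
    | cons y t =>
      have h : y :: t ≠ [] := by simp
      simp only [slice_one_neg_one, List.length_cons, gt_iff_lt]
      rw [if_pos (by omega), List.getLast_cons h]
      have key := tail_eq indent (y :: t) h (indent ++ "▶ " ++ x ++ "\n")
      rw [key]
      rw [if_neg (by simp), if_neg (by simp)]
      simp [String.append_assoc]
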